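-- pv_equiv track=rewrite | github.com/TomaszChowaniec1/Functions | 7.15.py | f
-- ===== SOURCE A (Python) =====
-- def f(detector):
--     people = 0
--     max_people = 0
--
--     for change in detector:
--         if change == '+':
--             people += 1
--         elif change == '-':
--             people -= 1
--
--         if people > max_people:
--             max_people = people
--
--     return max_people >= 3
-- ===== SOURCE B (Python) =====
-- def f(detector):
--     # Divide and conquer: g(s) returns (total, best) for the +1/-1/0 delta
--     # sequence of s, where total is the sum of all deltas and best is the
--     # maximum prefix sum (the empty prefix counts, so best >= 0).
--     # Combine rule: best(L+R) = max(best(L), total(L) + best(R)).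
--     def g(s):
--         n = len(s)
--         if n == 0:
--             return (0, 0)
--         if n == 1:
--             d = 1 if s == '+' else -1 if s == '-' else 0
--             return (d, max(0, d))
--         k = n // 2
--         sL, pL = g(s[:k])
--         sR, pR = g(s[k:])
--         return (sL + sR, max(pL, sL + pR))
--     return g(detector)[1] >= 3
-- ===== Notes on version B (the rewrite author's own statement) =====
-- stated objective: alternative
-- what changed: Replaces A's fused left-to-right accumulator loop with a divide-and-conquer recursion that splits the string in half, computes (delta sum, max prefix sum) for each half, and combines them with best(L+R)=max(best(L), sum(L)+best(R)).
import Mathlib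
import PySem

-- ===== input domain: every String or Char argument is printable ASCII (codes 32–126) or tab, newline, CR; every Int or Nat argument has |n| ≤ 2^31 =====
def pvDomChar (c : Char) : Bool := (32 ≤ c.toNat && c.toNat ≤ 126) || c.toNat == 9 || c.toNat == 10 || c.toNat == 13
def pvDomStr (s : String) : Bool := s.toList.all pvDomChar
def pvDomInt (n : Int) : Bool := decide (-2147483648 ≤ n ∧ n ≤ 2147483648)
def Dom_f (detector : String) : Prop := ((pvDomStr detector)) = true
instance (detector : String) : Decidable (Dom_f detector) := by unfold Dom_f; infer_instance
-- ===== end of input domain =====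

-- B replaces A's fused accumulator loop with a divide-and-conquer on string halves combining (delta sum, max prefix sum); alternative algorithm, same cost.


-- ===== PORT A =====
def fStep (st : Int × Int) (change : Char) : Int × Int :=
  let people := if change = '+' then st.1 + 1 else if change = '-' then st.1 - 1 else st.1
  (people, if people > st.2 then people else st.2)

def f (detector : String) : Bool :=
  decide ((detector.toList.foldl fStep (0, 0)).2 ≥ 3)

-- ===== PORT B =====
def fDelta (c : Char) : Int := if c = '+' then 1 else if c = '-' then -1 else 0

-- g of Source B: (total delta sum, max prefix sum) by splitting the string in half
def gDC : List Char → Int × Int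
  | [] => (0, 0)
  | [c] => (fDelta c, max 0 (fDelta c))
  | c1 :: c2 :: rest =>
      let l := c1 :: c2 :: rest
      let k := l.length / 2
      let L := gDC (l.take k)
      let R := gDC (l.drop k)
      (L.1 + R.1, max L.2 (L.1 + R.2))
termination_by l => l.length
decreasing_by
  · simp [List.length_take]; omega
  · simp [List.length_drop]; omega

def f_alt (detector : String) : Bool :=
  decide ((gDC detector.toList).2 ≥ 3)

-- ===== PRECONDITION & SPEC =====
def Spec_f (detector : String) (out : Bool) : Prop := out = f_alt detector
instance (detector : String) (out : Bool) : Decidable (Spec_f detector out) := by unfold Spec_f; infer_instance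

-- ===== CLAIM (what is proved, stated in full; the proofs are below) =====
def Claim_equal_f : Prop := ∀ (detector : String), Dom_f detector → Spec_f detector (f detector)

-- ===== LEMMAS AND PROOFS =====

-- max prefix sum (empty prefix included) of the delta sequence
def maxPref : List Char → Int
  | [] => 0
  | c :: t => max 0 (fDelta c + maxPref t)

lemma maxPref_nonneg (l : List Char) : 0 ≤ maxPref l := by
  cases l with
  | nil => simp [maxPref]
  | cons c t => simp [maxPref]

lemma maxPref_append (a b : List Char) :
    maxPref (a ++ b) = max (maxPref a) ((a.map fDelta).sum + maxPref b) := by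
  induction a with
  | nil => have := maxPref_nonneg b; simp [maxPref]; omega
  | cons c t ih =>
      have hb := maxPref_nonneg b
      have ht := maxPref_nonneg t
      simp only [List.cons_append, maxPref, ih, List.map, List.sum_cons]
      omega

lemma gDC_eq (l : List Char) : gDC l = ((l.map fDelta).sum, maxPref l) := by
  induction l using gDC.induct with
  | case1 => simp [gDC, maxPref]
  | case2 c =>
      rw [gDC]
      simp [maxPref]
  | case3 c1 c2 rest l k ihL ihR =>
      have hsplit : (c1 :: c2 :: rest) = l.take k ++ l.drop k :=
        (List.take_append_drop k l).symm
      rw [gDC, ihL, ihR]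
      conv_rhs => rw [hsplit]
      rw [maxPref_append, List.map_append, List.sum_append]

-- A's loop invariant: with people = p, max_people = m, p ≤ m
lemma loopA (l : List Char) (p m : Int) (h : p ≤ m) :
    (l.foldl fStep (p, m)).2 = max m (p + maxPref l) := by
  induction l generalizing p m with
  | nil => simp [maxPref]; omega
  | cons c t ih =>
      have ht := maxPref_nonneg t
      have hstep : fStep (p, m) c = (p + fDelta c, max m (p + fDelta c)) := by
        simp only [fStep, fDelta]
        split_ifs <;> simp <;> omega
      simp only [List.foldl, hstep]
      rw [ih (p + fDelta c) (max m (p + fDelta c)) (le_max_right _ _)]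
      simp only [maxPref]
      omega

-- ===== VERDICT (by name: the statement is the Claim_ definition above) =====
theorem f_spec : Claim_equal_f := by
  intro detector _
  unfold Spec_f f f_alt
  rw [loopA _ 0 0 le_rfl, gDC_eq]
  have := maxPref_nonneg detector.toList
  simp only [decide_eq_decide]
  omega
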